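-- pv_equiv track=rewrite | github.com/chwillchwill/CodeAnalyzer | main.py | check_solid_principles
-- ===== SOURCE A (Python) =====
-- def check_solid_principles(lines):
--     solid_score = 5
--     for line in lines:
--         if 'new ' in line and '(' in line:
--             solid_score -= 1
--         if 'static' in line:
--             solid_score -= 1
--         if 'interface' in line:
--             solid_score += 1
--         if 'abstract' in line:
--             solid_score += 1
--     return max(0, solid_score)
-- ===== SOURCE B (Python) =====
-- # Data-driven re-implementation: a table of (predicate, weight) rules; the outer
-- # loop runs over the RULES and the inner loop over the lines (transposed order),
-- # accumulating weights into the base score of 5, clamped at 0 at the end.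
-- RULES = [
--     (lambda l: 'new ' in l and '(' in l, -1),
--     (lambda l: 'static' in l, -1),
--     (lambda l: 'interface' in l, 1),
--     (lambda l: 'abstract' in l, 1),
-- ]
--
-- def check_solid_principles(lines):
--     score = 5
--     for pred, weight in RULES:
--         for line in lines:
--             if pred(line):
--                 score += weight
--     return score if score > 0 else 0
-- ===== Notes on version B (the rewrite author's own statement) =====
-- stated objective: alternative
-- what changed: Replaces the per-line accumulating loop over hard-coded if-branches with a data-driven rule table of (predicate, weight) pairs, traversed in transposed order (outer loop over rules, inner loop over lines), with an explicit conditional clamp instead of max.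
import Mathlib
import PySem

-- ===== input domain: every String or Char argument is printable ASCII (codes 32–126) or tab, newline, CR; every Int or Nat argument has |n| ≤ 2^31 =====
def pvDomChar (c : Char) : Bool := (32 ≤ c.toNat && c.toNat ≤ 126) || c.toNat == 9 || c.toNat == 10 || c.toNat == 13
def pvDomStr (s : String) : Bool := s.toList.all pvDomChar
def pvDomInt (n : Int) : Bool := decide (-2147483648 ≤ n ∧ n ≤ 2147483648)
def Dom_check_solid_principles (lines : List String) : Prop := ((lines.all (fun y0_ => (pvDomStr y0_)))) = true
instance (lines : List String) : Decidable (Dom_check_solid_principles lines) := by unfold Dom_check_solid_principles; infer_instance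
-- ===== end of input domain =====

-- B replaces A's per-line accumulating loop with a data-driven rule table traversed in transposed order (outer loop over rules, inner over lines); objective: alternative.

-- ===== PORT A =====
def check_solid_principles (lines : List String) : Int :=
  max 0 (lines.foldl (fun acc line =>
    let acc := if PySem.Str.isIn "new " line && PySem.Str.isIn "(" line then acc - 1 else acc
    let acc := if PySem.Str.isIn "static" line then acc - 1 else acc
    let acc := if PySem.Str.isIn "interface" line then acc + 1 else acc
    if PySem.Str.isIn "abstract" line then acc + 1 else acc) 5)

-- ===== PORT B =====
def cspRules : List ((String → Bool) × Int) :=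
  [ (fun l => PySem.Str.isIn "new " l && PySem.Str.isIn "(" l, -1)
  , (fun l => PySem.Str.isIn "static" l, -1)
  , (fun l => PySem.Str.isIn "interface" l, 1)
  , (fun l => PySem.Str.isIn "abstract" l, 1) ]

def check_solid_principles_alt (lines : List String) : Int :=
  let score := cspRules.foldl (fun s rule =>
    lines.foldl (fun s line => if rule.1 line then s + rule.2 else s) s) 5
  if score > 0 then score else 0

-- ===== PRECONDITION & SPEC =====
def Spec_check_solid_principles (lines : List String) (out : Int) : Prop := out = check_solid_principles_alt lines
instance (lines : List String) (out : Int) : Decidable (Spec_check_solid_principles lines out) := by unfold Spec_check_solid_principles; infer_instance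

-- ===== CLAIM (what is proved, stated in full; the proofs are below) =====
def Claim_equal_check_solid_principles : Prop := ∀ (lines : List String), Dom_check_solid_principles lines → Spec_check_solid_principles lines (check_solid_principles lines)

-- ===== LEMMAS AND PROOFS =====
-- A single rule's inner pass over the lines adds weight × (number of matching lines).
theorem csp_rule_pass (lines : List String) (p : String → Bool) (w s : Int) :
    lines.foldl (fun s line => if p line then s + w else s) s
    = s + w * (lines.countP p : Int) := by
  induction lines generalizing s with
  | nil => simp
  | cons h t ih =>
    simp only [List.foldl_cons, List.countP_cons, ih]
    split_ifs <;> push_cast <;> ring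

-- A's fused loop computes the same combination of the four counts.
theorem csp_foldl_eq (lines : List String) (a : Int) :
    lines.foldl (fun acc line =>
      let acc := if PySem.Str.isIn "new " line && PySem.Str.isIn "(" line then acc - 1 else acc
      let acc := if PySem.Str.isIn "static" line then acc - 1 else acc
      let acc := if PySem.Str.isIn "interface" line then acc + 1 else acc
      if PySem.Str.isIn "abstract" line then acc + 1 else acc) a
    = a - (lines.countP (fun l => PySem.Str.isIn "new " l && PySem.Str.isIn "(" l) : Int)
        - (lines.countP (fun l => PySem.Str.isIn "static" l) : Int)
        + (lines.countP (fun l => PySem.Str.isIn "interface" l) : Int)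
        + (lines.countP (fun l => PySem.Str.isIn "abstract" l) : Int) := by
  induction lines generalizing a with
  | nil => simp
  | cons h t ih =>
    simp only [List.foldl_cons, List.countP_cons, ih]
    split_ifs <;> push_cast <;> omega

-- ===== VERDICT (by name: the statement is the Claim_ definition above) =====
theorem check_solid_principles_spec : Claim_equal_check_solid_principles := by
  intro lines _
  unfold Spec_check_solid_principles check_solid_principles check_solid_principles_alt cspRules
  simp only [List.foldl_cons, List.foldl_nil, csp_rule_pass, csp_foldl_eq]
  omega
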